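-- pv_equiv track=rewrite | github.com/zmactep/ig-pipeline | parse_svm_output.py | kabat_range
-- ===== SOURCE A (Python) =====
-- from itertools import groupby, islice
--
-- def kabat_range(name, prediction, merge_threshold):
--     result = []
--     previous_stop = 0
--     for key, group in groupby(prediction):
--         sum_range = sum([1 for x in group])
--         start = previous_stop + 1
--         stop = start + sum_range - 1
--         result += start, stop
--         previous_stop = stop
--
--     #merge regions with len less than threshold
--     #ex merge_threshold = 7:
--     #[(1, 2), (3, 5), (6, 20)] -> [(1, 20)]
--     #[(10, 20), (30, 50)] -> [(10, 20), (30, 50)]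
--     previous = (result[0], result[1])
--     result.pop(0)
--     result.pop(0)
--     merged_ranges = []
--     for x, y in [(result[i], result[i + 1]) for i in range(0, len(result), 2)]:
--         if previous[1] - previous[0] + 1 < merge_threshold:
--             # region is small, merge with previous one and wait until merged
--             # region len will be sufficient to add to result (in else clause)
--             previous = previous[0], y
--         else:
--             merged_ranges.append(previous)
--             previous = (x, y)
--     merged_ranges.append(previous)
--     return name + '\t' + '\t'.join([str(x) + '\t' + str(y) for x, y in merged_ranges])
-- ===== SOURCE B (Python) =====
-- def kabat_range(name, prediction, merge_threshold):
--     # region stops = positions where the prediction value changes, plus the end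
--     stops = [i for i, (a, b) in enumerate(zip(prediction, prediction[1:]), 1) if a != b]
--     start = 1
--     pieces = [name]
--     for s in stops:
--         if s - start + 1 >= merge_threshold:
--             pieces.append('%d\t%d' % (start, s))
--             start = s + 1
--     pieces.append('%d\t%d' % (start, len(prediction)))
--     return '\t'.join(pieces)
-- ===== Notes on version B (the rewrite author's own statement) =====
-- stated objective: simpler
-- what changed: B drops groupby/run-length pairs entirely: it lists the change-point indices of the prediction with enumerate(zip(...)), then one loop over those stops keeps only a running start and appends formatted pieces directly, instead of A's build-flat-endpoint-list, re-pair-by-index, greedy-merge-pairs, then format passes.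
import Mathlib
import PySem

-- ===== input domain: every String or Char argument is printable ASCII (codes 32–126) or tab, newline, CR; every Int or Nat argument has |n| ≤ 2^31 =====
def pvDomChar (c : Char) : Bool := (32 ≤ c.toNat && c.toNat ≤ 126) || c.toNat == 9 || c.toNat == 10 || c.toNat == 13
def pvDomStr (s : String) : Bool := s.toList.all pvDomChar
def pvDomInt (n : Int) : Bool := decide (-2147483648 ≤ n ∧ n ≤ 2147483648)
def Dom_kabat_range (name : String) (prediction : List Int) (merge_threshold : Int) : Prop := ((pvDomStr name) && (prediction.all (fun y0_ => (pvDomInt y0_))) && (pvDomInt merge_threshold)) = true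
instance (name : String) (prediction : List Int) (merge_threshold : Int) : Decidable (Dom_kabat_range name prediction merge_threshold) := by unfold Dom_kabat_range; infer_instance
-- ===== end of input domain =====

-- B replaces A's groupby run-length pass + flat endpoint list + re-pairing + greedy pair merge by
-- change-point indices (enumerate over zip) and a single loop that keeps only a running start and
-- emits formatted pieces directly; objective: simpler.
-- Pre_ excludes the empty prediction, on which A raises IndexError (result[0]).


-- ===== PORT A =====
-- itertools.groupby run lengths
def groupLensAux : List Int → Int → Nat → List Nat
  | [], _, n => [n]
  | x :: xs, k, n => if x = k then groupLensAux xs k (n + 1) else n :: groupLensAux xs x 1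

def groupLens : List Int → List Nat
  | [] => []
  | x :: xs => groupLensAux xs x 1

-- first loop: result += start, stop over the groups
def buildRanges : List Nat → Int → List Int
  | [], _ => []
  | n :: rest, prev => (prev + 1) :: (prev + 1 + (n : Int) - 1) :: buildRanges rest (prev + 1 + (n : Int) - 1)

-- [(result[i], result[i+1]) for i in range(0, len(result), 2)]
def pairsOf : List Int → List (Int × Int)
  | x :: y :: rest => (x, y) :: pairsOf rest
  | _ => []

-- '\t'.join([str(x) + '\t' + str(y) for x, y in rs])
def fmtRanges (rs : List (Int × Int)) : String :=
  PySem.Str.join "\t" (rs.map (fun p => PySem.Int.toStr p.1 ++ "\t" ++ PySem.Int.toStr p.2))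

def kabat_range (name : String) (prediction : List Int) (merge_threshold : Int) : String :=
  let result := buildRanges (groupLens prediction) 0
  match result with
  | a :: b :: rest =>
    let st := (pairsOf rest).foldl
      (fun (st : List (Int × Int) × (Int × Int)) xy =>
        if st.2.2 - st.2.1 + 1 < merge_threshold then (st.1, (st.2.1, xy.2))
        else (st.1 ++ [st.2], xy))
      ([], (a, b))
    name ++ "\t" ++ fmtRanges (st.1 ++ [st.2])
  | _ => ""   -- prediction = [] : Python raises IndexError at result[0] (outside Pre_)

-- ===== PORT B =====
def kabat_range_alt (name : String) (prediction : List Int) (merge_threshold : Int) : String :=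
  let stops := ((PySem.List.enumerate (List.zip prediction (PySem.List.slice prediction (some 1) none)) 1).filter
      (fun p => decide (p.2.1 ≠ p.2.2))).map Prod.fst
  let st := stops.foldl
    (fun (st : Int × List String) s =>
      if s - st.1 + 1 ≥ merge_threshold then
        (s + 1, st.2 ++ [PySem.Int.toStr st.1 ++ "\t" ++ PySem.Int.toStr s])
      else st)
    (1, [name])
  PySem.Str.join "\t" (st.2 ++ [PySem.Int.toStr st.1 ++ "\t" ++ PySem.Int.toStr ((prediction.length : Int))])

-- ===== PRECONDITION & SPEC =====
-- Pre_ excludes exactly the empty prediction: there A raises IndexError (result[0]).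
def Pre_kabat_range (name : String) (prediction : List Int) (merge_threshold : Int) : Prop := prediction ≠ []
instance (name : String) (prediction : List Int) (merge_threshold : Int) : Decidable (Pre_kabat_range name prediction merge_threshold) := by unfold Pre_kabat_range; infer_instance
def pvWitness_kabat_range : String × List Int × Int := ("seq", [1, 1, 0, 0, 0, 2], 2)

def Spec_kabat_range (name : String) (prediction : List Int) (merge_threshold : Int) (out : String) : Prop := out = kabat_range_alt name prediction merge_threshold
instance (name : String) (prediction : List Int) (merge_threshold : Int) (out : String) : Decidable (Spec_kabat_range name prediction merge_threshold out) := by unfold Spec_kabat_range; infer_instance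

-- ===== CLAIM (what is proved, stated in full; the proofs are below) =====
def Claim_equal_kabat_range : Prop := ∀ (name : String) (prediction : List Int) (merge_threshold : Int), Dom_kabat_range name prediction merge_threshold → Pre_kabat_range name prediction merge_threshold → Spec_kabat_range name prediction merge_threshold (kabat_range name prediction merge_threshold)

-- ===== LEMMAS AND PROOFS =====

-- formatting of one region
def fmtP (p : Int × Int) : String := PySem.Int.toStr p.1 ++ "\t" ++ PySem.Int.toStr p.2

-- change points of the prediction, walking the tail with the previous value and the current index
def chg : List Int → Int → Int → List Int
  | [], _, _ => []
  | y :: ys, k, b => if y = k then chg ys y (b + 1) else b :: chg ys y (b + 1)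

-- running prefix sums of the group lengths (= the stop position of each raw region)
def sums : List Nat → Int → List Int
  | [], _ => []
  | n :: r, p => (p + (n : Int)) :: sums r (p + (n : Int))

-- regions reconstructed from a stop list (each region starts right after the previous stop)
def pairsFromStops : Int → List Int → List (Int × Int)
  | _, [] => []
  | p, s :: r => (p + 1, s) :: pairsFromStops s r

theorem groupLensAux_ne_nil (xs : List Int) (k : Int) (n : Nat) : groupLensAux xs k n ≠ [] := by
  induction xs generalizing k n with
  | nil => simp [groupLensAux]
  | cons y ys ih =>
    simp only [groupLensAux]
    split
    · exact ih k (n + 1)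
    · simp

theorem sums_nil_iff (r : List Nat) (p : Int) : sums r p = [] ↔ r = [] := by
  cases r <;> simp [sums]

-- B's comprehension over enumerate(zip(...), 1) computes the change points
theorem stops_eq_chg (x : Int) (xs : List Int) (i : Int) :
    ((PySem.List.enumerate (List.zip (x :: xs) xs) i).filter
        (fun p => decide (p.2.1 ≠ p.2.2))).map Prod.fst = chg xs x i := by
  induction xs generalizing x i with
  | nil => simp [chg, PySem.List.enumerate_nil]
  | cons y ys ih =>
    simp only [List.zip_cons_cons, PySem.List.enumerate_cons, List.filter_cons, chg, ne_eq,
      decide_not] at ih ⊢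
    by_cases h : y = x
    · subst h
      simp [ih]
    · have h' : ¬ x = y := fun e => h e.symm
      simp [h, h', ih]

-- the change points plus the end position are exactly the prefix sums of the group lengths
theorem chg_append_sums (xs : List Int) (k : Int) (n : Nat) (b : Int) :
    chg xs k b ++ [b + (xs.length : Int)] = sums (groupLensAux xs k n) (b - (n : Int)) := by
  induction xs generalizing k n b with
  | nil =>
    simp [chg, groupLensAux, sums]
  | cons y ys ih =>
    by_cases h : y = k
    · subst h
      simp only [chg, groupLensAux, List.length_cons]
      have h2 := ih y (n + 1) (b + 1)
      push_cast at h2 ⊢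
      rw [show (b : Int) + ((ys.length : Int) + 1) = b + 1 + (ys.length : Int) by ring,
          show (b : Int) - (n : Int) = b + 1 - ((n : Int) + 1) by ring]
      exact h2
    · simp only [chg, groupLensAux, if_neg h, List.length_cons, sums]
      have h2 := ih y 1 (b + 1)
      push_cast at h2 ⊢
      rw [show (b : Int) - (n : Int) + (n : Int) = b by ring,
          show (b : Int) + ((ys.length : Int) + 1) = b + 1 + (ys.length : Int) by ring]
      rw [show (b : Int) = b + 1 - 1 by ring] at h2 ⊢
      simpa using h2

-- A's re-paired endpoint list is the regions determined by the stop list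
theorem pairsOf_buildRanges (lens : List Nat) (prev : Int) :
    pairsOf (buildRanges lens prev) = pairsFromStops prev (sums lens prev) := by
  induction lens generalizing prev with
  | nil => simp [buildRanges, pairsOf, sums, pairsFromStops]
  | cons n r ih =>
    simp only [buildRanges, pairsOf, sums, pairsFromStops]
    rw [show prev + 1 + (n : Int) - 1 = prev + (n : Int) by ring, ih]

-- join "\t" distributes over a nonempty cons / a singleton
theorem join_cons (sep hd : String) (l : List String) (h : l ≠ []) :
    PySem.Str.join sep (hd :: l) = hd ++ sep ++ PySem.Str.join sep l := by
  apply String.toList_inj.mp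
  obtain ⟨b, t, rfl⟩ := List.exists_cons_of_ne_nil h
  simp [PySem.Str.toList_join, String.toList_append, PySem.Chars.join, List.intercalate]

theorem join_singleton (sep a : String) : PySem.Str.join sep [a] = a := by
  apply String.toList_inj.mp
  simp [PySem.Str.toList_join, PySem.Chars.join, List.intercalate]

-- the two merge loops agree: A folds the remaining regions carrying (merged pairs, previous pair),
-- B folds the stop list carrying (current start, emitted pieces); both then append the final region
theorem fold_corr (t last : Int) :
    ∀ (T : List Int) (p0 p1 : Int) (acc : List (Int × Int)) (hd : String),
    (fun a : List (Int × Int) × (Int × Int) => hd :: (a.1 ++ [a.2]).map fmtP)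
      ((pairsFromStops p1 (T ++ [last])).foldl
        (fun (st : List (Int × Int) × (Int × Int)) xy =>
          if st.2.2 - st.2.1 + 1 < t then (st.1, (st.2.1, xy.2))
          else (st.1 ++ [st.2], xy)) (acc, (p0, p1)))
    = (fun b : Int × List String => b.2 ++ [fmtP (b.1, last)])
      ((p1 :: T).foldl
        (fun (st : Int × List String) s =>
          if s - st.1 + 1 ≥ t then (s + 1, st.2 ++ [fmtP (st.1, s)]) else st)
        (p0, hd :: acc.map fmtP)) := by
  intro T
  induction T with
  | nil =>
    intro p0 p1 acc hd
    simp only [List.nil_append, pairsFromStops, List.foldl]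
    by_cases h : p1 - p0 + 1 < t
    · rw [if_pos h, if_neg (show ¬ p1 - p0 + 1 ≥ t by omega)]
      simp
    · rw [if_neg h, if_pos (show p1 - p0 + 1 ≥ t by omega)]
      simp
  | cons s T' ih =>
    intro p0 p1 acc hd
    by_cases h : p1 - p0 + 1 < t
    · have h2 := ih p0 s acc hd
      simp only [List.cons_append, pairsFromStops, List.foldl] at h2 ⊢
      rw [if_pos h, if_neg (show ¬ p1 - p0 + 1 ≥ t by omega)]
      exact h2
    · have h2 := ih (p1 + 1) s (acc ++ [(p0, p1)]) hd
      simp only [List.cons_append, pairsFromStops, List.foldl, List.map_append, List.map_cons,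
        List.map_nil] at h2 ⊢
      rw [if_neg h, if_pos (show p1 - p0 + 1 ≥ t by omega)]
      exact h2

-- ===== VERDICT (by name: the statement is the Claim_ definition above) =====
theorem kabat_range_spec : Claim_equal_kabat_range := by
  intro name prediction t _ hpre
  show kabat_range name prediction t = kabat_range_alt name prediction t
  obtain ⟨x, xs, rfl⟩ : ∃ x xs, prediction = x :: xs := by
    cases prediction with
    | nil => exact absurd rfl hpre
    | cons x xs => exact ⟨x, xs, rfl⟩
  have hstops : ((PySem.List.enumerate (List.zip (x :: xs) (PySem.List.slice (x :: xs) (some 1) none)) 1).filter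
      (fun p => decide (p.2.1 ≠ p.2.2))).map Prod.fst = chg xs x 1 := by
    rw [PySem.List.slice_from_one]
    simpa using stops_eq_chg x xs 1
  have hsum : chg xs x 1 ++ [1 + (xs.length : Int)] = sums (groupLensAux xs x 1) 0 := by
    have h := chg_append_sums xs x 1 1
    simpa using h
  cases hc : chg xs x 1 with
  | nil =>
    rw [hc] at hsum
    cases hgl : groupLensAux xs x 1 with
    | nil => exact absurd hgl (groupLensAux_ne_nil xs x 1)
    | cons n0 r =>
      rw [hgl] at hsum
      simp only [sums, List.nil_append, List.cons.injEq] at hsum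
      obtain ⟨h1, h2⟩ := hsum
      have hr : r = [] := (sums_nil_iff r _).mp h2.symm
      subst hr
      have hn0 : (0 : Int) + 1 + (n0 : Int) - 1 = (((x :: xs).length : Nat) : Int) := by
        simp only [List.length_cons]
        push_cast
        omega
      simp only [kabat_range, kabat_range_alt, groupLens, hgl, hstops, hc, buildRanges, pairsOf,
        List.foldl, fmtRanges, List.map, List.nil_append, List.singleton_append]
      rw [hn0]
      rw [join_cons "\t" name _ (by simp), join_singleton, join_singleton]
      norm_num
  | cons c cs =>
    rw [hc] at hsum
    cases hgl : groupLensAux xs x 1 with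
    | nil => exact absurd hgl (groupLensAux_ne_nil xs x 1)
    | cons n0 r =>
      rw [hgl] at hsum
      simp only [sums, List.cons_append, List.cons.injEq] at hsum
      obtain ⟨h1, h2⟩ := hsum
      simp only [kabat_range, kabat_range_alt, groupLens, hgl, hstops, hc, buildRanges, fmtRanges]
      rw [show (0 : Int) + 1 + (n0 : Int) - 1 = 0 + (n0 : Int) by ring]
      rw [pairsOf_buildRanges, ← h2, ← h1]
      rw [show (0 : Int) + 1 = 1 by ring]
      have hcorr := fold_corr t (1 + (xs.length : Int)) cs 1 c [] name
      simp only [List.map_nil] at hcorr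
      rw [show ((((x :: xs).length : Nat)) : Int) = 1 + (xs.length : Int) by
        simp only [List.length_cons]; push_cast; ring]
      rw [← join_cons "\t" name _ (by simp)]
      apply congrArg (PySem.Str.join "\t")
      simpa [fmtP] using hcorr
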